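-- pv_equiv track=rewrite | github.com/hugocondesa-debug/sonar-engine | src/sonar/overlays/rating_spread.py | _outlook_composite
-- ===== SOURCE A (Python) =====
-- def _outlook_composite(outlooks: list[str]) -> str:
--     counts: dict[str, int] = {}
--     for o in outlooks:
--         counts[o] = counts.get(o, 0) + 1
--     best = max(counts.values())
--     winners = [o for o, c in counts.items() if c == best]
--     if "stable" in winners:
--         return "stable"
--     return winners[0]
-- ===== SOURCE B (Python) =====
-- def _outlook_composite(outlooks: list[str]) -> str:
--     best = None
--     best_c = 0
--     for o in outlooks:
--         c = outlooks.count(o)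
--         if c > best_c or (c == best_c and o == "stable"):
--             best, best_c = o, c
--     return best
-- ===== Notes on version B (the rewrite author's own statement) =====
-- stated objective: alternative
-- what changed: A builds a counting dict then selects via max-of-values, a winners-list comprehension, a 'stable' membership test and winners[0]; B has no dict and no max(): it makes one pass over the list keeping a running (best, best_count) pair, getting each count from list.count(o), replacing the candidate on a strictly larger count or on an equal count when the newcomer is 'stable' - which reproduces A's stable-on-ties and first-inserted-winner rule; B trades A's O(n) hashing for an O(n^2) scan with no auxiliary structure.
import Mathlib
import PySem

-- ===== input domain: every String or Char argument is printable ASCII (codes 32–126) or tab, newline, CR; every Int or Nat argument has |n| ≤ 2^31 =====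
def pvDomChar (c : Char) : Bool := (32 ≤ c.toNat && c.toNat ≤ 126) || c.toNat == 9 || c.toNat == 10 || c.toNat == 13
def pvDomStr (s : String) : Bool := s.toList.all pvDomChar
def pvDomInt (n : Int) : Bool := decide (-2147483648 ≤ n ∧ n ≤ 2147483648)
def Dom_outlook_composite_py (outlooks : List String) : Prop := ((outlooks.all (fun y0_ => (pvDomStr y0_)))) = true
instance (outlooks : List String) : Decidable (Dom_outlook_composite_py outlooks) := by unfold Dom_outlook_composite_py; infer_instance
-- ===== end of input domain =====

-- B drops A's counting dict and selection block entirely: one pass over the list keeping a running best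
-- (candidate, count) pair, with list.count supplying each count; objective: alternative (no auxiliary dict; B is slower on large inputs).

-- ===== PORT A =====
def outlook_composite_py (outlooks : List String) : String :=
  let counts : PySem.Dict String Int :=
    outlooks.foldl (fun d o => d.insert o (d.getD o 0 + 1)) PySem.Dict.empty
  match PySem.List.max? counts.values (fun v => v) with
  | none => ""   -- max() of an empty sequence raises ValueError; excluded by Pre_
  | some best =>
    let winners := (counts.items.filter (fun p => p.2 == best)).map (fun p => p.1)
    if winners.contains "stable" then "stable" else winners.headD ""

-- ===== PORT B =====
def outlook_composite_py_alt (outlooks : List String) : String :=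
  let r := outlooks.foldl
    (fun (acc : Option String × Int) o =>
      let c : Int := (PySem.List.count outlooks o : Int)
      if decide (acc.2 < c) || (c == acc.2 && o == "stable") then (some o, c) else acc)
    (none, 0)
  (r.1).getD ""   -- 'return best': best is None only for empty input, which is outside Pre_

-- ===== PRECONDITION & SPEC =====
-- Pre_ excludes only the empty list, on which A raises ValueError via max() of an empty sequence.
def Pre_outlook_composite_py (outlooks : List String) : Prop := outlooks ≠ []
instance (outlooks : List String) : Decidable (Pre_outlook_composite_py outlooks) := by unfold Pre_outlook_composite_py; infer_instance
def pvWitness_outlook_composite_py : List String := (["up", "stable", "up"])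
def Spec_outlook_composite_py (outlooks : List String) (out : String) : Prop := out = outlook_composite_py_alt outlooks
instance (outlooks : List String) (out : String) : Decidable (Spec_outlook_composite_py outlooks out) := by unfold Spec_outlook_composite_py; infer_instance

-- ===== CLAIM (what is proved, stated in full; the proofs are below) =====
def Claim_equal_outlook_composite_py : Prop := ∀ (outlooks : List String), Dom_outlook_composite_py outlooks → Pre_outlook_composite_py outlooks → Spec_outlook_composite_py outlooks (outlook_composite_py outlooks)

-- ===== LEMMAS AND PROOFS =====

-- the count of k in outlooks, as the Int both programs compare
def pvC (L : List String) (k : String) : Int := ((List.count k L : Nat) : Int)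

-- the single Int key that summarises "(count, is-stable) lexicographically"
def pvG (c : String → Int) (o : String) : Int :=
  2 * c o + (if o == "stable" then 1 else 0)

-- the running-max loop behind max?
def pvF (g : String → Int) (x : String) (t : List String) : String :=
  t.foldl (fun m y => if g m < g y then y else m) x

lemma pv_max?_cons (g : String → Int) : ∀ (t : List String) (x : String),
    PySem.List.max? (x :: t) g = some (pvF g x t)
  | [], _ => rfl
  | y :: t, x => by
    have h1 : PySem.List.max? (x :: y :: t) g
        = PySem.List.max? ((if g x < g y then y else x) :: t) g := by
      by_cases h : g x < g y <;> simp [PySem.List.max?, h]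
    rw [h1, pv_max?_cons g t]
    rfl

lemma pvF_mem (g : String → Int) (t : List String) : ∀ x, pvF g x t ∈ x :: t := by
  induction t with
  | nil => intro x; simp [pvF]
  | cons y t ih =>
    intro x
    have h0 : pvF g x (y :: t) = pvF g (if g x < g y then y else x) t := rfl
    rw [h0]
    have hm := ih (if g x < g y then y else x)
    rcases List.mem_cons.1 hm with h | h
    · rw [h]; by_cases hc : g x < g y <;> simp [hc]
    · simp [h]

lemma pvF_of_max (g : String → Int) (t : List String) : ∀ x, (∀ y ∈ t, g y ≤ g x) → pvF g x t = x := by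
  induction t with
  | nil => intro x _; rfl
  | cons y t ih =>
    intro x h
    have hy : ¬ g x < g y := not_lt.2 (h y (List.mem_cons_self))
    have h0 : pvF g x (y :: t) = pvF g (if g x < g y then y else x) t := rfl
    rw [h0, if_neg hy]
    exact ih x (fun z hz => h z (List.mem_cons_of_mem _ hz))

lemma pvF_append (g : String → Int) (x : String) (t1 t2 : List String) :
    pvF g x (t1 ++ t2) = pvF g (pvF g x t1) t2 :=
  List.foldl_append

-- max? returns the FIRST element attaining the maximal key
lemma pv_max?_first (g : String → Int) (pre : List String) (r : String) (suf : List String)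
    (hpre : ∀ y ∈ pre, g y < g r) (hmax : ∀ y ∈ pre ++ r :: suf, g y ≤ g r) :
    PySem.List.max? (pre ++ r :: suf) g = some r := by
  have hsuf : ∀ y ∈ suf, g y ≤ g r := fun y hy =>
    hmax y (List.mem_append.2 (Or.inr (List.mem_cons_of_mem _ hy)))
  cases pre with
  | nil =>
    rw [List.nil_append, pv_max?_cons, pvF_of_max g suf r hsuf]
  | cons p pre' =>
    rw [List.cons_append, pv_max?_cons, pvF_append]
    have hm : g (pvF g p pre') < g r := by
      have := pvF_mem g pre' p
      exact hpre _ (by simpa using this)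
    have h1 : pvF g (pvF g p pre') (r :: suf) = pvF g r suf := by
      show pvF g (if g (pvF g p pre') < g r then r else pvF g p pre') suf = _
      rw [if_pos hm]
    rw [h1, pvF_of_max g suf r hsuf]

-- the dedup foldl only APPENDS new elements
lemma pv_foldl_add_decomp : ∀ (xs s : List String), ∃ u, xs.foldl PySem.Set.add s = s ++ u := by
  intro xs
  induction xs with
  | nil => exact fun s => ⟨[], by simp⟩
  | cons x t ih =>
    intro s
    by_cases hx : x ∈ s
    · obtain ⟨u, hu⟩ := ih s
      exact ⟨u, by simpa [PySem.Set.add, hx] using hu⟩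
    · obtain ⟨u, hu⟩ := ih (s ++ [x])
      refine ⟨x :: u, ?_⟩
      have h1 : (x :: t).foldl PySem.Set.add s = t.foldl PySem.Set.add (s ++ [x]) := by
        simp [PySem.Set.add, hx]
      rw [h1, hu]
      simp

-- scanning the deduplicated tail gives the same running max as scanning the raw tail
lemma pv_pvF_foldl_add (g : String → Int) : ∀ (xs s : List String) (m : String),
    (∀ y ∈ s, g y ≤ g m) → pvF g m (xs.foldl PySem.Set.add s) = pvF g m xs := by
  intro xs
  induction xs with
  | nil =>
    intro s m h
    simpa [pvF] using pvF_of_max g s m h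
  | cons x t ih =>
    intro s m h
    by_cases hx : x ∈ s
    · have hgx : g x ≤ g m := h x hx
      have h1 : (x :: t).foldl PySem.Set.add s = t.foldl PySem.Set.add s := by
        simp [PySem.Set.add, hx]
      have h2 : pvF g m (x :: t) = pvF g m t := by
        show pvF g (if g m < g x then x else m) t = pvF g m t
        rw [if_neg (not_lt.2 hgx)]
      rw [h1, ih s m h, h2]
    · set m' : String := if g m < g x then x else m with hm'
      have hm'max : ∀ y ∈ s ++ [x], g y ≤ g m' := by
        intro y hy
        have hmm' : g m ≤ g m' := by
          rw [hm']; by_cases hc : g m < g x <;> simp [hc] <;> omega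
        rcases List.mem_append.1 hy with hy | hy
        · exact le_trans (h y hy) hmm'
        · have hyx : y = x := by simpa using hy
          rw [hyx, hm']
          by_cases hc : g m < g x
          · simp [hc]
          · simp [hc]
            exact le_of_not_gt hc
      have h1 : (x :: t).foldl PySem.Set.add s = t.foldl PySem.Set.add (s ++ [x]) := by
        simp [PySem.Set.add, hx]
      obtain ⟨u, hu⟩ := pv_foldl_add_decomp t (s ++ [x])
      have hLHS : pvF g m (t.foldl PySem.Set.add (s ++ [x])) = pvF g m' u := by
        rw [hu, show s ++ [x] ++ u = s ++ ([x] ++ u) from by simp, pvF_append,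
          pvF_of_max g s m h]
        rfl
      have hIH : pvF g m' (t.foldl PySem.Set.add (s ++ [x])) = pvF g m' t :=
        ih (s ++ [x]) m' hm'max
      have hRHS : pvF g m' (t.foldl PySem.Set.add (s ++ [x])) = pvF g m' u := by
        rw [hu, pvF_append, pvF_of_max g (s ++ [x]) m' hm'max]
      rw [h1, hLHS, ← hRHS, hIH]
      rfl

-- first-maximal selection is invariant under ordered deduplication
lemma pv_max?_ofList (g : String → Int) (xs : List String) :
    PySem.List.max? (PySem.Set.ofList xs) g = PySem.List.max? xs g := by
  cases xs with
  | nil => rfl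
  | cons x t =>
    have h0 : PySem.Set.ofList (x :: t) = t.foldl PySem.Set.add [x] := by
      simp [PySem.Set.ofList_eq_foldl, PySem.Set.add, PySem.Set.contains]
    obtain ⟨u, hu⟩ := pv_foldl_add_decomp t [x]
    have hx : ∀ y ∈ ([x] : List String), g y ≤ g x := by intro y hy; simp at hy; simp [hy]
    have h1 : pvF g x (t.foldl PySem.Set.add [x]) = pvF g x t := pv_pvF_foldl_add g t [x] x hx
    have h2 : pvF g x (t.foldl PySem.Set.add [x]) = pvF g x u := by
      rw [hu]
      show pvF g x ([x] ++ u) = _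
      rw [pvF_append]
      show pvF g (if g x < g x then x else x) u = _
      simp
    rw [h0, hu, show ([x] : List String) ++ u = x :: u from rfl, pv_max?_cons, pv_max?_cons,
      ← h2, h1]

-- one step of B's loop, once a candidate is held, is the running-max step for the key pvG
lemma pv_step_eq (L : List String) (m o : String) :
    (if decide ((pvC L m) < ((PySem.List.count L o : Nat) : Int)) ||
        (((PySem.List.count L o : Nat) : Int) == pvC L m && o == "stable")
      then ((some o : Option String), ((PySem.List.count L o : Nat) : Int))
      else (some m, pvC L m))
    = (some (if pvG (pvC L) m < pvG (pvC L) o then o else m),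
       pvC L (if pvG (pvC L) m < pvG (pvC L) o then o else m)) := by
  rw [PySem.List.count_eq]
  by_cases hm : m = "stable" <;> by_cases ho : o = "stable"
  · subst hm; subst ho
    split_ifs <;> simp [pvC]
  all_goals {
    first
    | (subst hm
       have ho' : (o == "stable") = false := by simpa using ho
       have hiff : (decide (pvC L "stable" < ((List.count o L : Nat) : Int)) ||
           (((List.count o L : Nat) : Int) == pvC L "stable" && (o == "stable"))) = true
           ↔ pvG (pvC L) "stable" < pvG (pvC L) o := by
         simp [pvG, pvC, ho'] <;> omega
       rw [if_congr hiff rfl rfl]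
       split <;> simp [pvC])
    | (subst ho
       have hm' : (m == "stable") = false := by simpa using hm
       have hiff : (decide (pvC L m < ((List.count "stable" L : Nat) : Int)) ||
           (((List.count "stable" L : Nat) : Int) == pvC L m && (("stable" : String) == "stable"))) = true
           ↔ pvG (pvC L) m < pvG (pvC L) "stable" := by
         simp [pvG, pvC, hm'] <;> omega
       rw [if_congr hiff rfl rfl]
       split <;> simp [pvC])
    | (have hm' : (m == "stable") = false := by simpa using hm
       have ho' : (o == "stable") = false := by simpa using ho
       have hiff : (decide (pvC L m < ((List.count o L : Nat) : Int)) ||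
           (((List.count o L : Nat) : Int) == pvC L m && (o == "stable"))) = true
           ↔ pvG (pvC L) m < pvG (pvC L) o := by
         simp [pvG, pvC, ho', hm'] <;> omega
       rw [if_congr hiff rfl rfl]
       split <;> simp [pvC]) }

-- B's loop, once a candidate is held, computes the running max pvF for the key pvG
lemma pv_fold_inv (L : List String) : ∀ (t : List String) (m : String),
    t.foldl
      (fun (acc : Option String × Int) o =>
        let c : Int := (PySem.List.count L o : Int)
        if decide (acc.2 < c) || (c == acc.2 && o == "stable") then (some o, c) else acc)
      (some m, pvC L m)
    = (some (pvF (pvG (pvC L)) m t), pvC L (pvF (pvG (pvC L)) m t)) := by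
  intro t
  induction t with
  | nil => intro m; rfl
  | cons o t ih =>
    intro m
    rw [List.foldl_cons]
    refine Eq.trans (congrArg (fun a => List.foldl _ a t) (pv_step_eq L m o)) ?_
    exact ih _

-- B equals the single keyed max? over the raw list
lemma pv_B_char (outlooks : List String) (h : outlooks ≠ []) :
    outlook_composite_py_alt outlooks
      = (PySem.List.max? outlooks (pvG (pvC outlooks))).getD "" := by
  cases outlooks with
  | nil => exact absurd rfl h
  | cons x t =>
    unfold outlook_composite_py_alt
    rw [List.foldl_cons]
    have hcx : ((0 : Int) < ((PySem.List.count (x :: t) x : Nat) : Int)) := by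
      rw [PySem.List.count_eq]
      exact_mod_cast List.count_pos_iff.2 List.mem_cons_self
    have hcond : (decide (((none : Option String), (0:Int)).2 < ((PySem.List.count (x :: t) x : Nat) : Int)) ||
        (((PySem.List.count (x :: t) x : Nat) : Int) == ((none : Option String), (0:Int)).2 && x == "stable")) = true := by
      simp [hcx]
    refine Eq.trans (congrArg (fun (a : Option String × Int) => ((List.foldl _ a t).1).getD "")
      (show _ = ((some x : Option String), pvC (x :: t) x) from ?_)) ?_
    · show (if _ then ((some x : Option String), ((PySem.List.count (x :: t) x : Nat) : Int)) else ((none : Option String), (0:Int))) = (some x, pvC (x :: t) x)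
      rw [if_pos (of_decide_eq_true (by simpa using hcond))]
      simp [pvC, PySem.List.count_eq]
    · refine Eq.trans (congrArg (fun (p : Option String × Int) => (p.1).getD "")
        (pv_fold_inv (x :: t) t x)) ?_
      rw [pv_max?_cons]

-- ===== VERDICT (by name: the statement is the Claim_ definition above) =====
theorem outlook_composite_py_spec : Claim_equal_outlook_composite_py := by
  intro outlooks hdom hpre
  unfold Spec_outlook_composite_py
  rw [pv_B_char outlooks hpre, ← pv_max?_ofList]
  unfold outlook_composite_py
  simp only [PySem.Dict.foldl_insert_getD_add_one_eq_counter, PySem.Dict.values,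
    PySem.Dict.items_counter, List.map_map, Function.comp_def]
  set K := PySem.Set.ofList outlooks with hKdef
  set c : String → Int := pvC outlooks with hc
  -- K is nonempty
  have hKne : K ≠ [] := by
    cases outlooks with
    | nil => exact absurd rfl hpre
    | cons o t =>
      exact List.ne_nil_of_mem ((PySem.Set.mem_ofList _ _).2 List.mem_cons_self)
  -- the max of the counts exists
  cases hb : PySem.List.max? (List.map (fun k => ((List.count k outlooks : Nat) : Int)) K) (fun v => v) with
  | none =>
    exact absurd (List.map_eq_nil_iff.1 ((PySem.List.max?_eq_none_iff _ _).1 hb)) hKne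
  | some best =>
  have hmaxc : ∀ k ∈ K, c k ≤ best := fun k hk => by
    have := PySem.List.max?_isMax hb (((List.count k outlooks : Nat) : Int)) (List.mem_map_of_mem hk)
    simpa [hc, pvC] using this
  obtain ⟨k0, hk0K, hk0⟩ := List.mem_map.1 (PySem.List.max?_mem hb)
  -- the winners list is K filtered on count = best
  simp only [List.filter_map, List.map_map, Function.comp_def, List.map_id']
  rw [show (fun x => ((List.count x outlooks : Nat) : Int) == best) = (fun k => c k == best) from rfl]
  set W := List.filter (fun k => c k == best) K with hWdef
  -- bounds on the collapsed key pvG c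
  have hgmax : ∀ y ∈ K, pvG c y ≤ 2 * best + 1 := by
    intro y hy
    have := hmaxc y hy
    by_cases h : y == "stable" <;> simp [pvG, h] <;> omega
  by_cases hst : "stable" ∈ W
  · -- A returns "stable"; the keyed max over K is a strict max at "stable"
    obtain ⟨hsK, hsb⟩ := List.mem_filter.1 hst
    have hsbest : c "stable" = best := by simpa using hsb
    rw [if_pos (by simpa using hst)]
    obtain ⟨k, hk⟩ := Option.isSome_iff_exists.1 ((PySem.List.index?_isSome_iff K "stable").2 hsK)
    obtain ⟨pre, suf, hKeq, -, hnot⟩ := (PySem.List.index?_eq_some_iff K "stable" k).1 hk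
    have hgst : pvG c "stable" = 2 * best + 1 := by simp [pvG, hsbest]
    have hpre2 : ∀ y ∈ pre, pvG c y < pvG c "stable" := by
      intro y hy
      have hyK : y ∈ K := hKeq ▸ List.mem_append.2 (Or.inl hy)
      have hyne : (y == "stable") = false := by
        exact beq_eq_false_iff_ne.2 (fun h => hnot (h ▸ hy))
      have := hmaxc y hyK
      simp [pvG, hyne]
      omega
    have hmax2 : ∀ y ∈ pre ++ "stable" :: suf, pvG c y ≤ pvG c "stable" := by
      intro y hy
      rw [hgst]
      exact hgmax y (hKeq ▸ hy)
    rw [hKeq, pv_max?_first (pvG c) pre "stable" suf hpre2 hmax2]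
    rfl
  · -- "stable" is not a winner: both sides give the first element with maximal count
    have hk0W : k0 ∈ W := List.mem_filter.2 ⟨hk0K, by simp [hc, pvC, hk0]⟩
    cases hW : W with
    | nil => exact absurd (hW ▸ hk0W) (List.not_mem_nil)
    | cons r rest =>
    rw [if_neg (by simp only [List.contains_iff_mem]; exact fun h => hst (hW ▸ h))]
    obtain ⟨l1, l2, hKeq, hl1, hr, -⟩ :=
      List.filter_eq_cons_iff.1 (show List.filter (fun k => c k == best) K = r :: rest from hW)
    have hrbest : c r = best := by simpa using hr
    have hrW : r ∈ W := hW ▸ List.mem_cons_self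
    have hrne : (r == "stable") = false :=
      beq_eq_false_iff_ne.2 (fun h => hst (h ▸ hrW))
    have hpre1 : ∀ y ∈ l1, pvG c y < pvG c r := by
      intro y hy
      have hyK : y ∈ K := by rw [hKeq]; exact List.mem_append.2 (Or.inl hy)
      have hyne : c y ≠ best := fun h => hl1 y hy (by simp [h])
      have hle := hmaxc y hyK
      by_cases h : y == "stable" <;>
        simp only [pvG, h, hrne, hc, pvC, if_true] at hyne hle hrbest ⊢ <;> omega
    have hmax1 : ∀ y ∈ l1 ++ r :: l2, pvG c y ≤ pvG c r := by
      intro y hy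
      have hyK : y ∈ K := by rw [hKeq]; exact hy
      have hle := hmaxc y hyK
      by_cases h : y == "stable"
      · have hy' : y = "stable" := by simpa using h
        subst hy'
        have hyne : c "stable" ≠ best :=
          fun hcy => hst (List.mem_filter.2 ⟨hyK, beq_iff_eq.2 hcy⟩)
        simp only [pvG, h, hrne, hc, pvC, if_true] at hyne hle hrbest ⊢
        omega
      · simp only [pvG, h, hrne, hc, pvC] at hle hrbest ⊢
        omega
    rw [hKeq, pv_max?_first (pvG c) l1 r l2 hpre1 hmax1]
    rfl
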